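-- pv_equiv track=rewrite | github.com/nortikin/sverchok | nodes/text/viewer_text_mk3.py | readFORviewer_sockets_data
-- ===== SOURCE A (Python) =====
-- def readFORviewer_sockets_data(data, dept, le, num_lines):
--     cache = ''
--     output = ''
--     deptl = dept - 1
--     if le:
--         cache += ('(' + str(le) + ') object(s)')
--         del(le)
--     if deptl > 1:
--         for i, object in enumerate(data):
--             cache += ('\n' + '=' + str(i) + '=   (' + str(len(object)) + ')')
--             cache += str(readFORviewer_sockets_data(object, deptl, False, num_lines))
--     else:
--         for k, val in enumerate(data):
--             output += ('\n' + str(val))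
--             if k >= num_lines-1: break
--     return cache + output
-- ===== SOURCE B (Python) =====
-- def readFORviewer_sockets_data(data, dept, le, num_lines):
--     # Flat, recursion-free rendering: the break-loop becomes a slice, the
--     # string accumulation becomes ''.join over comprehensions.
--     k = max(num_lines, 1)
--     head = '({0}) object(s)'.format(le) if le else ''
--     if dept > 2:
--         return head + ''.join(
--             '\n={0}=   ({1})'.format(i, len(obj))
--             + ''.join('\n{0}'.format(v) for v in obj[:k])
--             for i, obj in enumerate(data))
--     return head + ''.join('\n{0}'.format(obj) for obj in data[:k])
-- ===== Notes on version B (the rewrite author's own statement) =====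
-- stated objective: simpler
-- what changed: Replaces A's recursion, mutable string accumulators and break-loop by a flat non-recursive rendering: a join over comprehensions with the break replaced by a slice obj[:max(num_lines,1)].
import Mathlib
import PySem

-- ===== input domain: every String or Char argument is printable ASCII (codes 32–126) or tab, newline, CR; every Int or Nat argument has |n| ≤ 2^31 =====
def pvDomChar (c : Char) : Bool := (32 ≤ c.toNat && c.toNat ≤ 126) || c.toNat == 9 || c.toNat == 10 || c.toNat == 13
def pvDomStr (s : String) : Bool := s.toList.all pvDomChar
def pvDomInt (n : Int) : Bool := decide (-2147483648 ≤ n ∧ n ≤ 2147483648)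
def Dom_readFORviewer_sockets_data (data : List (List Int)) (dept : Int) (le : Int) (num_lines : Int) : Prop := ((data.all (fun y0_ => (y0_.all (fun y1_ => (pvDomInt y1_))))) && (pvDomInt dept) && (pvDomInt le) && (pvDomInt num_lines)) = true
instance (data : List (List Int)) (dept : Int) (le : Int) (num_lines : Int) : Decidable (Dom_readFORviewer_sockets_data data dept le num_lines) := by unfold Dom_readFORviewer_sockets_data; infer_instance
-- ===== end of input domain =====

-- B replaces A's recursion and break-loops by a flat join of comprehensions with a slice
-- (objective: simpler); equal to A wherever A returns (Pre_ excludes the inputs where A raises TypeError).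

-- str(l) for a Python list of ints: '[a, b, c]'
def pyStrIntList (l : List Int) : String :=
  "[" ++ String.intercalate ", " (l.map PySem.Int.toStr) ++ "]"

-- ===== PORT A =====
-- A's leaf loop: for k, val in enumerate(data): output += '\n' + str(val); if k >= num_lines-1: break
def pvLeafLoopA {α : Type} (f : α → String) : List α → Int → Int → String
  | [], _, _ => ""
  | v :: rest, k, nl =>
    if k ≥ nl - 1 then "\n" ++ f v
    else ("\n" ++ f v) ++ pvLeafLoopA f rest (k + 1) nl

-- A's recursive call readFORviewer_sockets_data(object, deptl, False, num_lines) on an inner List Int.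
-- With le = False the cache stays ''.  When deptl - 1 > 1 Python calls len() on each int and raises
-- TypeError for a nonempty object (excluded by Pre_); for object = [] the loop body never runs and it
-- returns '' — which is what this branch yields.
def pvReadInnerA (object : List Int) (dept : Int) (num_lines : Int) : String :=
  if dept - 1 > 1 then ""
  else pvLeafLoopA PySem.Int.toStr object 0 num_lines

def readFORviewer_sockets_data (data : List (List Int)) (dept : Int) (le : Int) (num_lines : Int) : String :=
  let cache := if le ≠ 0 then "(" ++ PySem.Int.toStr le ++ ") object(s)" else ""
  let deptl := dept - 1
  if deptl > 1 then
    data.zipIdx.foldl (fun c p =>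
      c ++ ("\n" ++ "=" ++ PySem.Int.toStr (p.2 : Int) ++ "=   (" ++ PySem.Int.toStr (p.1.length : Int) ++ ")")
        ++ pvReadInnerA p.1 deptl num_lines) cache
  else
    cache ++ pvLeafLoopA pyStrIntList data 0 num_lines

-- ===== PORT B =====
def readFORviewer_sockets_data_alt (data : List (List Int)) (dept : Int) (le : Int) (num_lines : Int) : String :=
  let k := max num_lines 1
  -- obj[:k] with k ≥ 1 is exactly List.take k.toNat
  let head := if le ≠ 0 then "(" ++ PySem.Int.toStr le ++ ") object(s)" else ""
  if dept > 2 then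
    head ++ String.join (data.zipIdx.map (fun p =>
      "\n" ++ "=" ++ PySem.Int.toStr (p.2 : Int) ++ "=   (" ++ PySem.Int.toStr (p.1.length : Int) ++ ")"
        ++ String.join ((p.1.take k.toNat).map (fun v => "\n" ++ PySem.Int.toStr v))))
  else
    head ++ String.join ((data.take k.toNat).map (fun o => "\n" ++ pyStrIntList o))

-- ===== PRECONDITION & SPEC =====
-- Pre_ excludes exactly the inputs where A raises TypeError (len() of an int):
-- dept ≥ 4 together with some nonempty inner list.
def Pre_readFORviewer_sockets_data (data : List (List Int)) (dept : Int) (le : Int) (num_lines : Int) : Prop :=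
  dept ≤ 3 ∨ ∀ o ∈ data, o = []
instance (data : List (List Int)) (dept : Int) (le : Int) (num_lines : Int) : Decidable (Pre_readFORviewer_sockets_data data dept le num_lines) := by unfold Pre_readFORviewer_sockets_data; infer_instance

def pvWitness_readFORviewer_sockets_data : List (List Int) × Int × Int × Int := ([[1], [2, 3]], 3, 2, 2)

def Spec_readFORviewer_sockets_data (data : List (List Int)) (dept : Int) (le : Int) (num_lines : Int) (out : String) : Prop := out = readFORviewer_sockets_data_alt data dept le num_lines
instance (data : List (List Int)) (dept : Int) (le : Int) (num_lines : Int) (out : String) : Decidable (Spec_readFORviewer_sockets_data data dept le num_lines out) := by unfold Spec_readFORviewer_sockets_data; infer_instance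

-- ===== CLAIM (what is proved, stated in full; the proofs are below) =====
def Claim_equal_readFORviewer_sockets_data : Prop := ∀ (data : List (List Int)) (dept : Int) (le : Int) (num_lines : Int), Dom_readFORviewer_sockets_data data dept le num_lines → Pre_readFORviewer_sockets_data data dept le num_lines → Spec_readFORviewer_sockets_data data dept le num_lines (readFORviewer_sockets_data data dept le num_lines)
-- ===== LEMMAS AND PROOFS =====

-- fold of string concatenation with a seed = seed ++ join
theorem pvFoldlStr (l : List String) (a : String) :
    l.foldl (· ++ ·) a = a ++ String.join l := by
  induction l generalizing a with
  | nil => simp [String.join]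
  | cons x xs ih =>
    have hj : String.join (x :: xs) = x ++ String.join xs := by
      show List.foldl (· ++ ·) ("" ++ x) xs = _
      rw [String.empty_append, ih]
    rw [List.foldl_cons, ih, hj, String.append_assoc]

theorem pvFoldlAppend {β : Type} (g : β → String) (l : List β) (init : String) :
    l.foldl (fun c p => c ++ g p) init = init ++ String.join (l.map g) := by
  rw [← List.foldl_map]
  exact pvFoldlStr _ _

theorem pvJoinCons (a : String) (l : List String) :
    String.join (a :: l) = a ++ String.join l := by
  simp only [String.join, List.foldl, String.empty_append]
  exact pvFoldlStr _ _

-- A's break-loop emits exactly the first max(nl - k, 1) lines.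
theorem pvLeafLoopA_eq {α : Type} (f : α → String) (xs : List α) (k nl : Int) :
    pvLeafLoopA f xs k nl
      = String.join ((xs.take (max (nl - k) 1).toNat).map (fun v => "\n" ++ f v)) := by
  induction xs generalizing k with
  | nil => simp [pvLeafLoopA, String.join]
  | cons v rest ih =>
    by_cases h : k ≥ nl - 1
    · have h1 : (max (nl - k) 1).toNat = 1 := by omega
      rw [pvLeafLoopA, if_pos h, h1]
      simp [String.join]
    · have h1 : (max (nl - k) 1).toNat = ((max (nl - (k + 1)) 1).toNat) + 1 := by omega
      rw [pvLeafLoopA, if_neg h, h1, List.take_succ_cons, List.map_cons, pvJoinCons, ih]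

-- ===== VERDICT (by name: the statement is the Claim_ definition above) =====
theorem readFORviewer_sockets_data_spec : Claim_equal_readFORviewer_sockets_data := by
  intro data dept le num_lines _ hpre
  unfold Spec_readFORviewer_sockets_data readFORviewer_sockets_data readFORviewer_sockets_data_alt
  by_cases hd : dept - 1 > 1
  · have hd2 : dept > 2 := by omega
    simp only [if_pos hd, if_pos hd2, String.append_assoc, pvFoldlAppend]
    congr 1
    congr 1
    apply List.map_congr_left
    intro p hp
    have hinner : pvReadInnerA p.1 (dept - 1) num_lines
        = String.join ((p.1.take (max num_lines 1).toNat).map (fun v => "\n" ++ PySem.Int.toStr v)) := by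
      by_cases h3 : dept ≤ 3
      · rw [pvReadInnerA, if_neg (by omega), pvLeafLoopA_eq]
        norm_num
      · have hemp : p.1 = [] := by
          rcases hpre with h | h
          · omega
          · exact h p.1 (List.fst_mem_of_mem_zipIdx hp)
        rw [pvReadInnerA, if_pos (by omega), hemp]
        simp [String.join]
    rw [hinner]
  · have hd2 : ¬ dept > 2 := by omega
    simp only [if_neg hd, if_neg hd2, pvLeafLoopA_eq]
    norm_num
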